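-- pv_equiv track=rewrite | github.com/MDJuniooor/Algorithm | BOJ_study/브루토포스/14888.py | calc
-- ===== SOURCE A (Python) =====
-- def calc(a, index, cur, plus, minus, mul, div):
--     if index == len(a):
--         return (cur, cur)
--     res = []
--     if plus > 0:
--         res.append(calc(a, index+1, cur+a[index], plus-1, minus, mul, div))
--     if minus > 0:
--         res.append(calc(a, index+1, cur-a[index], plus, minus-1, mul, div))
--     if mul > 0:
--         res.append(calc(a, index+1, cur*a[index], plus, minus, mul-1, div))
--     if div > 0:
--         if cur >= 0:
--             res.append(
--                 calc(a, index+1, cur//a[index], plus, minus, mul, div-1))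
--         else:
--             res.append(
--                 calc(a, index+1, -(-cur//a[index]), plus, minus, mul, div-1))
--     ans = (
--         max([t[0] for t in res]),
--         min([t[1] for t in res])
--     )
--
--     return ans
-- ===== SOURCE B (Python) =====
-- def calc(a, index, cur, plus, minus, mul, div):
--     # Level-by-level iteration over the remaining operand positions with a
--     # deduplicated frontier of (plus, minus, mul, div, cur) states, instead of
--     # A's branching recursion; answer = max/min over the final frontier.
--     states = {(plus, minus, mul, div, cur)}
--     for i in range(index, len(a)):
--         x = a[i]
--         nxt = set()
--         for (p, m, mu, d, c) in states:
--             if p > 0: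
--                 nxt.add((p - 1, m, mu, d, c + x))
--             if m > 0:
--                 nxt.add((p, m - 1, mu, d, c - x))
--             if mu > 0:
--                 nxt.add((p, m, mu - 1, d, c * x))
--             if d > 0:
--                 nxt.add((p, m, mu, d - 1, c // x if c >= 0 else -(-c // x)))
--         states = nxt
--     vals = [s[4] for s in states]
--     return (max(vals), min(vals))
-- ===== Notes on version B (the rewrite author's own statement) =====
-- stated objective: alternative
-- what changed: Replaces A's depth-first recursion (which recomputes identical (counts, cur) subproblems once per path) by an iterative level-by-level sweep that keeps a deduplicated frontier set of (plus, minus, mul, div, cur) states and takes max/min over the final frontier; states whose count-vector and running value coincide are merged instead of re-expanded.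
import Mathlib
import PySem

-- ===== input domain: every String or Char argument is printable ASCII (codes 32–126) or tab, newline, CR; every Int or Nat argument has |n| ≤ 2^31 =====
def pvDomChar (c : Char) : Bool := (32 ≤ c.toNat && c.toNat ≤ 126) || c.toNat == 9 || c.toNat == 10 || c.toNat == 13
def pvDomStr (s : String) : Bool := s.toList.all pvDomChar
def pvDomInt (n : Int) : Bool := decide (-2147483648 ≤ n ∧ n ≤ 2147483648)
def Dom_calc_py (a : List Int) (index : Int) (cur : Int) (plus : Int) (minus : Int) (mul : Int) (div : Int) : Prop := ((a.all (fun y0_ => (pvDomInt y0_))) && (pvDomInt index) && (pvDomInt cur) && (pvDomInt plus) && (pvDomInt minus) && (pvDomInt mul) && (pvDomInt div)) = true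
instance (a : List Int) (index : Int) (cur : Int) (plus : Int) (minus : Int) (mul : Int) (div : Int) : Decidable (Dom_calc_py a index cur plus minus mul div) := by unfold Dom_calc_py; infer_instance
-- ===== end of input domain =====

-- ===== PORT A =====
-- A recurses on index until index == len(a); fuel (a.length - index).toNat is the
-- exact recursion depth for index ≤ len(a) (the fuel-0 value (0,0) is unreachable
-- under Pre_, as is the .getD 0 on max?/min? of an empty res and on pyGet?).
def calcA (a : List Int) (fuel : Nat) (index cur plus minus mul div : Int) : Int × Int :=
  if index = (a.length : Int) then (cur, cur)
  else match fuel with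
  | 0 => (0, 0)
  | n + 1 =>
    let x := (PySem.List.pyGet? a index).getD 0
    let res : List (Int × Int) :=
      (if plus > 0 then [calcA a n (index+1) (cur + x) (plus-1) minus mul div] else []) ++
      (if minus > 0 then [calcA a n (index+1) (cur - x) plus (minus-1) mul div] else []) ++
      (if mul > 0 then [calcA a n (index+1) (cur * x) plus minus (mul-1) div] else []) ++
      (if div > 0 then
        (if cur ≥ 0 then [calcA a n (index+1) (PySem.Int.floordiv cur x) plus minus mul (div-1)]
         else [calcA a n (index+1) (-(PySem.Int.floordiv (-cur) x)) plus minus mul (div-1)])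
       else [])
    ((PySem.List.max? (res.map Prod.fst) (fun t => t)).getD 0,
     (PySem.List.min? (res.map Prod.snd) (fun t => t)).getD 0)

def calc_py (a : List Int) (index : Int) (cur : Int) (plus : Int) (minus : Int) (mul : Int) (div : Int) : Int × Int :=
  calcA a ((a.length : Int) - index).toNat index cur plus minus mul div

-- ===== PORT B =====
-- B iterates over the remaining positions, keeping a deduplicated frontier set of
-- (plus, minus, mul, div, cur) states, then takes max/min over the final frontier.
def calc_py_alt (a : List Int) (index : Int) (cur : Int) (plus : Int) (minus : Int) (mul : Int) (div : Int) : Int × Int :=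
  let init : PySem.Set (Int × Int × Int × Int × Int) := PySem.Set.ofList [(plus, minus, mul, div, cur)]
  let states := (PySem.List.pyRange index (a.length : Int) 1).foldl (fun states i =>
    let x := (PySem.List.pyGet? a i).getD 0
    states.foldl (fun nxt s =>
      match s with
      | (p, m, mu, d, c) =>
        let nxt := if p > 0 then PySem.Set.add nxt (p-1, m, mu, d, c + x) else nxt
        let nxt := if m > 0 then PySem.Set.add nxt (p, m-1, mu, d, c - x) else nxt
        let nxt := if mu > 0 then PySem.Set.add nxt (p, m, mu-1, d, c * x) else nxt
        if d > 0 then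
          PySem.Set.add nxt (p, m, mu, d-1,
            if c ≥ 0 then PySem.Int.floordiv c x else -(PySem.Int.floordiv (-c) x))
        else nxt)
      (PySem.Set.empty)) init
  let vals := states.map (fun s => s.2.2.2.2)
  ((PySem.List.max? vals (fun t => t)).getD 0, (PySem.List.min? vals (fun t => t)).getD 0)

-- ===== PRECONDITION & SPEC =====
-- Pre_ is exactly the inputs on which the Python A returns: it excludes index past
-- len(a) or below -len(a) (IndexError), too few positive operator counts to reach the
-- end (max()/min() of an empty res, ValueError), and, when div > 0, a zero among the
-- operands the recursion visits (ZeroDivisionError; for index < 0 Python's negative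
-- indexing makes A visit a[len+index:] and then all of a, so the visited operands
-- include a zero exactly when a does).
def Pre_calc_py (a : List Int) (index : Int) (cur : Int) (plus : Int) (minus : Int) (mul : Int) (div : Int) : Prop :=
  -(a.length : Int) ≤ index ∧ index ≤ (a.length : Int) ∧
  (a.length : Int) - index ≤ max plus 0 + max minus 0 + max mul 0 + max div 0 ∧
  (0 < div → ∀ x ∈ (if 0 ≤ index then a.drop index.toNat else a), x ≠ 0)
instance (a : List Int) (index : Int) (cur : Int) (plus : Int) (minus : Int) (mul : Int) (div : Int) : Decidable (Pre_calc_py a index cur plus minus mul div) := by unfold Pre_calc_py; infer_instance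

def pvWitness_calc_py : List Int × Int × Int × Int × Int × Int × Int := ([1, 2], 0, 0, 1, 1, 0, 0)

def Spec_calc_py (a : List Int) (index : Int) (cur : Int) (plus : Int) (minus : Int) (mul : Int) (div : Int) (out : Int × Int) : Prop := out = calc_py_alt a index cur plus minus mul div
instance (a : List Int) (index : Int) (cur : Int) (plus : Int) (minus : Int) (mul : Int) (div : Int) (out : Int × Int) : Decidable (Spec_calc_py a index cur plus minus mul div out) := by unfold Spec_calc_py; infer_instance

-- ===== CLAIM (what is proved, stated in full; the proofs are below) =====
def Claim_equal_calc_py : Prop := ∀ (a : List Int) (index : Int) (cur : Int) (plus : Int) (minus : Int) (mul : Int) (div : Int), Dom_calc_py a index cur plus minus mul div → Pre_calc_py a index cur plus minus mul div → Spec_calc_py a index cur plus minus mul div (calc_py a index cur plus minus mul div)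

-- ===== LEMMAS AND PROOFS =====

-- one expansion step: the successor states of (p, m, mu, d, c) on operand x, in A's branch order
def stepSt (x : Int) (s : Int × Int × Int × Int × Int) : List (Int × Int × Int × Int × Int) :=
  match s with
  | (p, m, mu, d, c) =>
    (if p > 0 then [(p-1, m, mu, d, c + x)] else []) ++
    (if m > 0 then [(p, m-1, mu, d, c - x)] else []) ++
    (if mu > 0 then [(p, m, mu-1, d, c * x)] else []) ++
    (if d > 0 then [(p, m, mu, d-1, if c ≥ 0 then PySem.Int.floordiv c x else -(PySem.Int.floordiv (-c) x))] else [])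

-- all leaf states after consuming the operand list r
def leavesSt : List Int → (Int × Int × Int × Int × Int) → List (Int × Int × Int × Int × Int)
  | [], s => [s]
  | x :: r, s => (stepSt x s).flatMap (leavesSt r)

def opsOf (s : Int × Int × Int × Int × Int) : Int := max s.1 0 + max s.2.1 0 + max s.2.2.1 0 + max s.2.2.2.1 0

def valOf (s : Int × Int × Int × Int × Int) : Int := s.2.2.2.2

-- the operands A's recursion visits from position index (Python indexing)
def visEl (a : List Int) (index : Int) : List Int :=
  (PySem.List.pyRange index (a.length : Int) 1).map (fun i => (PySem.List.pyGet? a i).getD 0)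

theorem stepSt_ne_nil {x : Int} {s : Int × Int × Int × Int × Int} (h : 1 ≤ opsOf s) : stepSt x s ≠ [] := by
  obtain ⟨p, m, mu, d, c⟩ := s
  simp only [opsOf] at h
  simp only [stepSt]
  intro hnil
  rw [List.append_eq_nil_iff, List.append_eq_nil_iff, List.append_eq_nil_iff] at hnil
  obtain ⟨⟨⟨h1, h2⟩, h3⟩, h4⟩ := hnil
  split_ifs at h1 h2 h3 h4 <;> simp_all

theorem opsOf_step {x : Int} {s t : Int × Int × Int × Int × Int} (ht : t ∈ stepSt x s) : opsOf t = opsOf s - 1 := by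
  obtain ⟨p, m, mu, d, c⟩ := s
  simp only [stepSt, List.mem_append] at ht
  rcases ht with ((h | h) | h) | h <;> split_ifs at h <;>
    simp_all [opsOf] <;> omega

theorem leavesSt_ne_nil {r : List Int} {s : Int × Int × Int × Int × Int} (h : (r.length : Int) ≤ opsOf s) : leavesSt r s ≠ [] := by
  induction r generalizing s with
  | nil => simp [leavesSt]
  | cons x r ih =>
    simp only [List.length_cons] at h
    have hs : (1 : Int) ≤ opsOf s := by push_cast at h ⊢; omega
    obtain ⟨t, ht⟩ := List.exists_mem_of_ne_nil _ (stepSt_ne_nil (x := x) hs)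
    simp only [leavesSt]
    intro hnil
    rw [List.flatMap_eq_nil_iff] at hnil
    exact ih (s := t) (by have := opsOf_step ht; push_cast at h ⊢; omega) (hnil t ht)

theorem pymax_eq_some_iff (l : List Int) (v : Int) : PySem.List.max? l (fun t => t) = some v ↔ v ∈ l ∧ ∀ y ∈ l, y ≤ v := by
  constructor
  · intro h
    exact ⟨PySem.List.max?_mem h, fun y hy => PySem.List.max?_isMax h y hy⟩
  · rintro ⟨hv, hub⟩
    cases hmax : PySem.List.max? l (fun t => t) with
    | none =>
      rw [PySem.List.max?_eq_none_iff] at hmax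
      subst hmax; simp at hv
    | some m =>
      have hm := PySem.List.max?_mem hmax
      have h1 : v ≤ m := PySem.List.max?_isMax hmax v hv
      have h2 : m ≤ v := hub m hm
      simp [le_antisymm h1 h2]

theorem pymin_eq_some_iff (l : List Int) (v : Int) : PySem.List.min? l (fun t => t) = some v ↔ v ∈ l ∧ ∀ y ∈ l, v ≤ y := by
  constructor
  · intro h
    exact ⟨PySem.List.min?_mem h, fun y hy => PySem.List.min?_isMin h y hy⟩
  · rintro ⟨hv, hub⟩
    cases hmin : PySem.List.min? l (fun t => t) with
    | none =>
      rw [PySem.List.min?_eq_none_iff] at hmin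
      subst hmin; simp at hv
    | some m =>
      have hm := PySem.List.min?_mem hmin
      have h1 : m ≤ v := PySem.List.min?_isMin hmin v hv
      have h2 : v ≤ m := hub m hm
      simp [le_antisymm h2 h1]

theorem pymax_congr {l₁ l₂ : List Int} (h₁ : l₁ ≠ []) (h : ∀ y, y ∈ l₁ ↔ y ∈ l₂) :
    PySem.List.max? l₁ (fun t => t) = PySem.List.max? l₂ (fun t => t) := by
  cases hmax : PySem.List.max? l₁ (fun t => t) with
  | none => rw [PySem.List.max?_eq_none_iff] at hmax; exact absurd hmax h₁
  | some m =>
    obtain ⟨hm, hub⟩ := (pymax_eq_some_iff l₁ m).mp hmax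
    exact ((pymax_eq_some_iff l₂ m).mpr ⟨(h m).mp hm, fun y hy => hub y ((h y).mpr hy)⟩).symm

theorem pymin_congr {l₁ l₂ : List Int} (h₁ : l₁ ≠ []) (h : ∀ y, y ∈ l₁ ↔ y ∈ l₂) :
    PySem.List.min? l₁ (fun t => t) = PySem.List.min? l₂ (fun t => t) := by
  cases hmin : PySem.List.min? l₁ (fun t => t) with
  | none => rw [PySem.List.min?_eq_none_iff] at hmin; exact absurd hmin h₁
  | some m =>
    obtain ⟨hm, hub⟩ := (pymin_eq_some_iff l₁ m).mp hmin
    exact ((pymin_eq_some_iff l₂ m).mpr ⟨(h m).mp hm, fun y hy => hub y ((h y).mpr hy)⟩).symm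

theorem pymax_map_flat {α : Type} (ss : List α) (g : α → List Int) (hne : ss ≠ []) (h : ∀ t ∈ ss, g t ≠ []) :
    PySem.List.max? (ss.map (fun t => (PySem.List.max? (g t) (fun y => y)).getD 0)) (fun y => y)
      = PySem.List.max? (ss.flatMap g) (fun y => y) := by
  cases hM : PySem.List.max? (ss.map (fun t => (PySem.List.max? (g t) (fun y => y)).getD 0)) (fun y => y) with
  | none => rw [PySem.List.max?_eq_none_iff, List.map_eq_nil_iff] at hM; exact absurd hM hne
  | some M =>
    obtain ⟨hMmem, hMub⟩ := (pymax_eq_some_iff _ M).mp hM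
    rw [List.mem_map] at hMmem
    obtain ⟨t0, ht0, hMt0⟩ := hMmem
    cases h0 : PySem.List.max? (g t0) (fun y => y) with
    | none => rw [PySem.List.max?_eq_none_iff] at h0; exact absurd h0 (h t0 ht0)
    | some m0 =>
      rw [h0] at hMt0
      simp only [Option.getD_some] at hMt0
      subst hMt0
      obtain ⟨hm0, _⟩ := (pymax_eq_some_iff _ m0).mp h0
      refine ((pymax_eq_some_iff _ m0).mpr ⟨List.mem_flatMap.mpr ⟨t0, ht0, hm0⟩, ?_⟩).symm
      intro y hy
      obtain ⟨t, ht, hyt⟩ := List.mem_flatMap.mp hy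
      cases h1 : PySem.List.max? (g t) (fun y => y) with
      | none => rw [PySem.List.max?_eq_none_iff] at h1; exact absurd h1 (h t ht)
      | some mt =>
        obtain ⟨_, hub⟩ := (pymax_eq_some_iff _ mt).mp h1
        have h2 : mt ≤ m0 := by
          refine hMub mt (List.mem_map.mpr ⟨t, ht, ?_⟩)
          rw [h1]; rfl
        exact le_trans (hub y hyt) h2

theorem pymin_map_flat {α : Type} (ss : List α) (g : α → List Int) (hne : ss ≠ []) (h : ∀ t ∈ ss, g t ≠ []) :
    PySem.List.min? (ss.map (fun t => (PySem.List.min? (g t) (fun y => y)).getD 0)) (fun y => y)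
      = PySem.List.min? (ss.flatMap g) (fun y => y) := by
  cases hM : PySem.List.min? (ss.map (fun t => (PySem.List.min? (g t) (fun y => y)).getD 0)) (fun y => y) with
  | none => rw [PySem.List.min?_eq_none_iff, List.map_eq_nil_iff] at hM; exact absurd hM hne
  | some M =>
    obtain ⟨hMmem, hMub⟩ := (pymin_eq_some_iff _ M).mp hM
    rw [List.mem_map] at hMmem
    obtain ⟨t0, ht0, hMt0⟩ := hMmem
    cases h0 : PySem.List.min? (g t0) (fun y => y) with
    | none => rw [PySem.List.min?_eq_none_iff] at h0; exact absurd h0 (h t0 ht0)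
    | some m0 =>
      rw [h0] at hMt0
      simp only [Option.getD_some] at hMt0
      subst hMt0
      obtain ⟨hm0, _⟩ := (pymin_eq_some_iff _ m0).mp h0
      refine ((pymin_eq_some_iff _ m0).mpr ⟨List.mem_flatMap.mpr ⟨t0, ht0, hm0⟩, ?_⟩).symm
      intro y hy
      obtain ⟨t, ht, hyt⟩ := List.mem_flatMap.mp hy
      cases h1 : PySem.List.min? (g t) (fun y => y) with
      | none => rw [PySem.List.min?_eq_none_iff] at h1; exact absurd h1 (h t ht)
      | some mt =>
        obtain ⟨_, hub⟩ := (pymin_eq_some_iff _ mt).mp h1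
        have h2 : m0 ≤ mt := by
          refine hMub mt (List.mem_map.mpr ⟨t, ht, ?_⟩)
          rw [h1]; rfl
        exact le_trans h2 (hub y hyt)

theorem visEl_nil {a : List Int} {index : Int} (h : (a.length : Int) ≤ index) : visEl a index = [] := by
  simp [visEl, PySem.List.pyRange_one_eq_nil h]

theorem visEl_cons {a : List Int} {index : Int} (h : index < (a.length : Int)) :
    visEl a index = ((PySem.List.pyGet? a index).getD 0) :: visEl a (index + 1) := by
  rw [visEl, PySem.List.pyRange_one_cons h, List.map_cons]; rfl

theorem visEl_len {a : List Int} {index : Int} :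
    ((visEl a index).length : Int) = max ((a.length : Int) - index) 0 := by
  rw [visEl, List.length_map, PySem.List.length_pyRange_one]
  omega

-- characterization of A's recursion: max/min over all leaf values
theorem calcA_eq (a : List Int) : ∀ (n : Nat) (index cur plus minus mul div : Int),
    ((a.length : Int) - index).toNat = n → index ≤ (a.length : Int) →
    (a.length : Int) - index ≤ opsOf (plus, minus, mul, div, cur) →
    calcA a n index cur plus minus mul div =
      ((PySem.List.max? ((leavesSt (visEl a index) (plus, minus, mul, div, cur)).map valOf) (fun t => t)).getD 0,
       (PySem.List.min? ((leavesSt (visEl a index) (plus, minus, mul, div, cur)).map valOf) (fun t => t)).getD 0) := by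
  intro n
  induction n with
  | zero =>
    intro index cur p m mu d h0 hle hops
    have hix : index = (a.length : Int) := by omega
    subst hix
    rw [visEl_nil le_rfl]
    simp [calcA, leavesSt, valOf, PySem.List.max?_id_cons, PySem.List.min?_id_cons]
  | succ n ih =>
    intro index cur p m mu d hn hle hops
    have hlt : index < (a.length : Int) := by omega
    have hne : index ≠ (a.length : Int) := by omega
    have hops0 : (1 : Int) ≤ opsOf (p, m, mu, d, cur) := by
      simp only [opsOf] at hops ⊢; omega
    have hFT : ∀ t ∈ stepSt ((PySem.List.pyGet? a index).getD 0) (p, m, mu, d, cur),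
        calcA a n (index+1) t.2.2.2.2 t.1 t.2.1 t.2.2.1 t.2.2.2.1
          = ((PySem.List.max? ((leavesSt (visEl a (index+1)) t).map valOf) (fun t => t)).getD 0,
             (PySem.List.min? ((leavesSt (visEl a (index+1)) t).map valOf) (fun t => t)).getD 0) := by
      intro t ht
      have hops' := opsOf_step ht
      obtain ⟨p', m', mu', d', c'⟩ := t
      refine ih (index+1) c' p' m' mu' d' (by omega) (by omega) ?_
      simp only [opsOf] at hops hops' ⊢
      omega
    have hL : calcA a (n+1) index cur p m mu d =
        ((PySem.List.max? (((stepSt ((PySem.List.pyGet? a index).getD 0) (p, m, mu, d, cur)).map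
            (fun t => calcA a n (index+1) t.2.2.2.2 t.1 t.2.1 t.2.2.1 t.2.2.2.1)).map Prod.fst) (fun t => t)).getD 0,
         (PySem.List.min? (((stepSt ((PySem.List.pyGet? a index).getD 0) (p, m, mu, d, cur)).map
            (fun t => calcA a n (index+1) t.2.2.2.2 t.1 t.2.1 t.2.2.1 t.2.2.2.1)).map Prod.snd) (fun t => t)).getD 0) := by
      rw [calcA, if_neg hne]
      simp only [stepSt, List.map_append]
      split_ifs <;> simp
    have hstep_ne : stepSt ((PySem.List.pyGet? a index).getD 0) (p, m, mu, d, cur) ≠ [] :=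
      stepSt_ne_nil hops0
    have hg : ∀ t ∈ stepSt ((PySem.List.pyGet? a index).getD 0) (p, m, mu, d, cur),
        (leavesSt (visEl a (index+1)) t).map valOf ≠ [] := by
      intro t ht
      rw [Ne, List.map_eq_nil_iff]
      refine leavesSt_ne_nil ?_
      have hops' := opsOf_step ht
      have hlen := visEl_len (a := a) (index := index + 1)
      simp only [opsOf] at hops hops' ⊢
      omega
    rw [hL, visEl_cons hlt]
    simp only [leavesSt]
    rw [List.map_flatMap]
    refine congrArg₂ Prod.mk ?_ ?_
    · rw [List.map_map]
      have hm : ((stepSt ((PySem.List.pyGet? a index).getD 0) (p, m, mu, d, cur)).map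
            (Prod.fst ∘ fun t => calcA a n (index+1) t.2.2.2.2 t.1 t.2.1 t.2.2.1 t.2.2.2.1))
          = ((stepSt ((PySem.List.pyGet? a index).getD 0) (p, m, mu, d, cur)).map
            (fun t => (PySem.List.max? ((leavesSt (visEl a (index+1)) t).map valOf) (fun y => y)).getD 0)) :=
        List.map_congr_left (fun t ht => by simp only [Function.comp_apply, hFT t ht])
      rw [hm, pymax_map_flat _ _ hstep_ne hg]
    · rw [List.map_map]
      have hm : ((stepSt ((PySem.List.pyGet? a index).getD 0) (p, m, mu, d, cur)).map
            (Prod.snd ∘ fun t => calcA a n (index+1) t.2.2.2.2 t.1 t.2.1 t.2.2.1 t.2.2.2.1))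
          = ((stepSt ((PySem.List.pyGet? a index).getD 0) (p, m, mu, d, cur)).map
            (fun t => (PySem.List.min? ((leavesSt (visEl a (index+1)) t).map valOf) (fun y => y)).getD 0)) :=
        List.map_congr_left (fun t ht => by simp only [Function.comp_apply, hFT t ht])
      rw [hm, pymin_map_flat _ _ hstep_ne hg]

theorem mem_foldl_add {t : Int × Int × Int × Int × Int} (l : List (Int × Int × Int × Int × Int)) (acc : PySem.Set (Int × Int × Int × Int × Int)) :
    t ∈ l.foldl PySem.Set.add acc ↔ t ∈ acc ∨ t ∈ l := by
  induction l generalizing acc with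
  | nil => simp
  | cons y l ih =>
    rw [List.foldl_cons, ih]
    simp [PySem.Set.mem_add, List.mem_cons, or_assoc]

-- B's inner loop body is sequential Set.add over stepSt
theorem bodyB_eq (x : Int) (nxt : PySem.Set (Int × Int × Int × Int × Int)) (s : Int × Int × Int × Int × Int) :
    (match s with
     | (p, m, mu, d, c) =>
       let nxt := if p > 0 then PySem.Set.add nxt (p-1, m, mu, d, c + x) else nxt
       let nxt := if m > 0 then PySem.Set.add nxt (p, m-1, mu, d, c - x) else nxt
       let nxt := if mu > 0 then PySem.Set.add nxt (p, m, mu-1, d, c * x) else nxt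
       if d > 0 then
         PySem.Set.add nxt (p, m, mu, d-1,
           if c ≥ 0 then PySem.Int.floordiv c x else -(PySem.Int.floordiv (-c) x))
       else nxt)
      = (stepSt x s).foldl PySem.Set.add nxt := by
  obtain ⟨p, m, mu, d, c⟩ := s
  simp only [stepSt]
  split_ifs <;> simp [List.foldl]

theorem mem_inner {t : Int × Int × Int × Int × Int} (x : Int) (states acc : PySem.Set (Int × Int × Int × Int × Int)) :
    t ∈ states.foldl (fun nxt s => (stepSt x s).foldl PySem.Set.add nxt) acc ↔ t ∈ acc ∨ ∃ s ∈ states, t ∈ stepSt x s := by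
  induction states generalizing acc with
  | nil => simp
  | cons s l ih =>
    rw [List.foldl_cons, ih, mem_foldl_add]
    simp only [List.exists_mem_cons_iff]
    tauto

theorem mem_outer {t : Int × Int × Int × Int × Int} (a : List Int) (is : List Int) :
    ∀ (init : PySem.Set (Int × Int × Int × Int × Int)),
    (t ∈ is.foldl (fun states i =>
        states.foldl (fun nxt s => (stepSt ((PySem.List.pyGet? a i).getD 0) s).foldl PySem.Set.add nxt) PySem.Set.empty) init
      ↔ ∃ s ∈ init, t ∈ leavesSt (is.map (fun i => (PySem.List.pyGet? a i).getD 0)) s) := by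
  induction is with
  | nil => intro init; simp [leavesSt]
  | cons i is ih =>
    intro init
    rw [List.foldl_cons, ih]
    simp only [List.map_cons, leavesSt, List.mem_flatMap, mem_inner]
    constructor
    · rintro ⟨s', hs', ht⟩
      rcases hs' with h | ⟨s, hs, hstep⟩
      · simp [PySem.Set.empty] at h
      · exact ⟨s, hs, s', hstep, ht⟩
    · rintro ⟨s, hs, s', hstep, ht⟩
      exact ⟨s', Or.inr ⟨s, hs, hstep⟩, ht⟩

-- ===== VERDICT (by name: the statement is the Claim_ definition above) =====
theorem calc_py_spec : Claim_equal_calc_py := by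
  intro a index cur plus minus mul div _hdom hpre
  obtain ⟨hlo, hhi, hcnt, _⟩ := hpre
  unfold Spec_calc_py
  have hops : (a.length : Int) - index ≤ opsOf (plus, minus, mul, div, cur) := by
    simpa [opsOf] using hcnt
  rw [calc_py, calcA_eq a _ index cur plus minus mul div rfl hhi hops]
  have hleaves_ne : leavesSt (visEl a index) (plus, minus, mul, div, cur) ≠ [] := by
    refine leavesSt_ne_nil ?_
    have hlen := visEl_len (a := a) (index := index)
    simp only [opsOf] at hops ⊢
    omega
  rw [calc_py_alt]
  have hfun : (fun (states : PySem.Set (Int × Int × Int × Int × Int)) (i : Int) =>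
      let x := (PySem.List.pyGet? a i).getD 0
      states.foldl (fun nxt s =>
        match s with
        | (p, m, mu, d, c) =>
          let nxt := if p > 0 then PySem.Set.add nxt (p-1, m, mu, d, c + x) else nxt
          let nxt := if m > 0 then PySem.Set.add nxt (p, m-1, mu, d, c - x) else nxt
          let nxt := if mu > 0 then PySem.Set.add nxt (p, m, mu-1, d, c * x) else nxt
          if d > 0 then
            PySem.Set.add nxt (p, m, mu, d-1,
              if c ≥ 0 then PySem.Int.floordiv c x else -(PySem.Int.floordiv (-c) x))
          else nxt)
        (PySem.Set.empty))
      = (fun (states : PySem.Set (Int × Int × Int × Int × Int)) (i : Int) =>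
          states.foldl (fun nxt s =>
            (stepSt ((PySem.List.pyGet? a i).getD 0) s).foldl PySem.Set.add nxt) PySem.Set.empty) := by
    funext states i
    show List.foldl _ PySem.Set.empty states = List.foldl _ PySem.Set.empty states
    congr 1
    funext nxt s
    exact bodyB_eq ((PySem.List.pyGet? a i).getD 0) nxt s
  rw [hfun]
  have hmem : ∀ y, y ∈ (leavesSt (visEl a index) (plus, minus, mul, div, cur)).map valOf
      ↔ y ∈ ((PySem.List.pyRange index (a.length : Int) 1).foldl (fun states i =>
          states.foldl (fun nxt s =>
            (stepSt ((PySem.List.pyGet? a i).getD 0) s).foldl PySem.Set.add nxt) PySem.Set.empty)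
          (PySem.Set.ofList [(plus, minus, mul, div, cur)])).map (fun s => s.2.2.2.2) := by
    intro y
    simp only [List.mem_map]
    constructor
    · rintro ⟨t, ht, rfl⟩
      refine ⟨t, ?_, rfl⟩
      rw [mem_outer]
      exact ⟨(plus, minus, mul, div, cur), by simp [PySem.Set.mem_ofList], ht⟩
    · rintro ⟨t, ht, rfl⟩
      rw [mem_outer] at ht
      obtain ⟨s0, hs0, ht⟩ := ht
      simp only [PySem.Set.mem_ofList, List.mem_singleton] at hs0
      subst hs0
      exact ⟨t, ht, rfl⟩
  have hne1 : (leavesSt (visEl a index) (plus, minus, mul, div, cur)).map valOf ≠ [] := by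
    rw [Ne, List.map_eq_nil_iff]; exact hleaves_ne
  refine congrArg₂ Prod.mk ?_ ?_
  · rw [← pymax_congr hne1 hmem]
  · rw [← pymin_congr hne1 hmem]
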